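-- pv_equiv track=rewrite | github.com/doctorsrn/hw_cc2 | CodeCraft-2019/src/util1.py | cut_adl
-- ===== SOURCE A (Python) =====
-- from copy import deepcopy
--
-- def cut_adl(adl, rc):
--     adl_cut = deepcopy(adl)
--     for node, next_node in zip(rc['from'], rc['to']):
--         # 将双向邻接关系都剪断
--         if adl_cut.__contains__(node):
--             if adl_cut[node].__contains__(next_node):
--                 adl_cut[node].pop(next_node)
--         if adl_cut.__contains__(next_node):
--             if adl_cut[next_node].__contains__(node):
--                 adl_cut[next_node].pop(node)
--
--     return adl_cut
-- ===== SOURCE B (Python) =====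
-- def cut_adl(adl, rc):
--     cut = set()
--     for a, b in zip(rc['from'], rc['to']):
--         cut.add((a, b))
--         cut.add((b, a))
--     return {node: {k: v for k, v in nbrs.items() if (node, k) not in cut}
--             for node, nbrs in adl.items()}
-- ===== Notes on version B (the rewrite author's own statement) =====
-- stated objective: alternative
-- what changed: B precomputes a set of directed (node, neighbour) pairs to cut from both directions of each rc edge and rebuilds the dict in one comprehension pass filtering by that set, instead of A's per-edge contains/pop mutation loop.
import Mathlib
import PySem

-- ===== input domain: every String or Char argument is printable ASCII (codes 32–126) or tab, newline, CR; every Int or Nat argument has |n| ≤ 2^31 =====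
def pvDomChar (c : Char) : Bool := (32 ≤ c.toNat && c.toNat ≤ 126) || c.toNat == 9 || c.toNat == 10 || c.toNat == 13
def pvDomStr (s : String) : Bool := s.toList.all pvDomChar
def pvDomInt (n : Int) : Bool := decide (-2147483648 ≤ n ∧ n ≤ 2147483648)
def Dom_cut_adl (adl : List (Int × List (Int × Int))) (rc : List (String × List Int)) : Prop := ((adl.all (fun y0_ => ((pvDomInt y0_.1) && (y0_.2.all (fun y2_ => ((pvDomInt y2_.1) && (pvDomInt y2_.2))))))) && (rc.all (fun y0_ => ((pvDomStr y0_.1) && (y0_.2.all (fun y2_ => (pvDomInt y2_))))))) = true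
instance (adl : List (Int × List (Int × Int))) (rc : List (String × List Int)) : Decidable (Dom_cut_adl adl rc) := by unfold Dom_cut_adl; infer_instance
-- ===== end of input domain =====

-- B rebuilds the result in one pass over the adjacency dict, filtering by a precomputed set of
-- directed pairs to cut, instead of A's per-edge pop loop (objective: alternative; return value only —
-- A mutates nothing the caller passed, it pops from a deep copy).

-- ===== PORT A =====
-- the adjacency dict as a PySem.Dict of PySem.Dicts (identity on the underlying lists)
def cutToD (L : List (Int × List (Int × Int))) : PySem.Dict Int (PySem.Dict Int Int) :=
  PySem.Dict.mk (L.map (fun e => (e.1, PySem.Dict.mk e.2)))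

-- one direction of the loop body: 'if adl_cut.__contains__(x): if adl_cut[x].__contains__(y): adl_cut[x].pop(y)'
def cutPhase (d : PySem.Dict Int (PySem.Dict Int Int)) (a b : Int) : PySem.Dict Int (PySem.Dict Int Int) :=
  if d.contains a then
    (if (d.getD a PySem.Dict.empty).contains b then
       d.modify a PySem.Dict.empty (fun inner => inner.erase b)
     else d)
  else d

def cut_adl (adl : List (Int × List (Int × Int))) (rc : List (String × List Int)) : List (Int × List (Int × Int)) :=
  -- adl_cut = deepcopy(adl): values are ints, the copy equals the original
  let rcd : PySem.Dict String (List Int) := PySem.Dict.mk rc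
  -- rc['from'] / rc['to'] raise KeyError when the key is missing — excluded by Pre_; getD agrees there
  let pairs : List (Int × Int) := List.zip (rcd.getD "from" []) (rcd.getD "to" [])
  let fin : PySem.Dict Int (PySem.Dict Int Int) :=
    pairs.foldl (fun d p => cutPhase (cutPhase d p.1 p.2) p.2 p.1) (cutToD adl)
  fin.items.map (fun e => (e.1, e.2.items))

-- ===== PORT B =====
def cut_adl_alt (adl : List (Int × List (Int × Int))) (rc : List (String × List Int)) : List (Int × List (Int × Int)) :=
  let rcd : PySem.Dict String (List Int) := PySem.Dict.mk rc
  let cut : PySem.Set (Int × Int) :=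
    (List.zip (rcd.getD "from" []) (rcd.getD "to" [])).foldl
      (fun s p => PySem.Set.add (PySem.Set.add s (p.1, p.2)) (p.2, p.1)) PySem.Set.empty
  adl.map (fun e => (e.1, e.2.filter (fun kv => !(PySem.Set.contains cut (e.1, kv.1)))))

-- ===== PRECONDITION & SPEC =====
-- Pre_ excludes rc lacking key 'from' or 'to' (there A raises KeyError) and adl association lists with
-- duplicate outer keys, which do not represent any Python dict (adl is a dict[int, dict[int, int]]).
def Pre_cut_adl (adl : List (Int × List (Int × Int))) (rc : List (String × List Int)) : Prop :=
  "from" ∈ rc.map Prod.fst ∧ "to" ∈ rc.map Prod.fst ∧ (adl.map Prod.fst).Nodup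
instance (adl : List (Int × List (Int × Int))) (rc : List (String × List Int)) : Decidable (Pre_cut_adl adl rc) := by unfold Pre_cut_adl; infer_instance

def pvWitness_cut_adl : (List (Int × List (Int × Int))) × (List (String × List Int)) :=
  ([(1, [(2, 5), (3, 7)]), (2, [(1, 5)]), (3, [(1, 7), (4, 1)])], [("from", [1, 9]), ("to", [2, 3])])

def Spec_cut_adl (adl : List (Int × List (Int × Int))) (rc : List (String × List Int)) (out : List (Int × List (Int × Int))) : Prop := out = cut_adl_alt adl rc
instance (adl : List (Int × List (Int × Int))) (rc : List (String × List Int)) (out : List (Int × List (Int × Int))) : Decidable (Spec_cut_adl adl rc out) := by unfold Spec_cut_adl; infer_instance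

-- ===== CLAIM (what is proved, stated in full; the proofs are below) =====
def Claim_equal_cut_adl : Prop := ∀ (adl : List (Int × List (Int × Int))) (rc : List (String × List Int)), Dom_cut_adl adl rc → Pre_cut_adl adl rc → Spec_cut_adl adl rc (cut_adl adl rc)

-- ===== LEMMAS AND PROOFS =====

-- the filter that cutPhase performs on every entry, expressed entry-wise
def cutF (a b : Int) (e : Int × List (Int × Int)) : Int × List (Int × Int) :=
  (e.1, e.2.filter (fun kv => !(e.1 == a && kv.1 == b)))

lemma cutF_eq_self (a b : Int) (e : Int × List (Int × Int)) (h : e.1 ≠ a) :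
    cutF a b e = e := by
  have hb : (e.1 == a) = false := by simpa using h
  simp [cutF, hb]

lemma map_cutF_id (a b : Int) (L : List (Int × List (Int × Int))) (h : a ∉ L.map Prod.fst) :
    L.map (cutF a b) = L := by
  conv_rhs => rw [← List.map_id L]
  refine List.map_congr_left (fun e he => ?_)
  have : e.1 ≠ a := fun hh => h (hh ▸ List.mem_map_of_mem he)
  simp [cutF_eq_self a b e this]

lemma cutPhase_spec (a b : Int) (L : List (Int × List (Int × Int)))
    (hnd : (L.map Prod.fst).Nodup) :
    cutPhase (cutToD L) a b = cutToD (L.map (cutF a b)) := by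
  induction L with
  | nil => simp [cutPhase, cutToD, PySem.Dict.contains]
  | cons e L ih =>
    simp only [List.map_cons, List.nodup_cons, List.mem_map] at hnd
    obtain ⟨hne, hnd⟩ := hnd
    by_cases hea : e.1 = a
    · subst hea
      have hmem : ∀ x ∈ L, x.1 ≠ e.1 := fun x hx hh => hne ⟨x, hx, hh⟩
      have hc : (cutToD (e :: L)).contains e.1 = true := by
        simp [cutToD, PySem.Dict.contains]
      have hg : (cutToD (e :: L)).getD e.1 PySem.Dict.empty = PySem.Dict.mk e.2 := by
        simp [cutToD, PySem.Dict.getD, PySem.Dict.get?]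
      by_cases hb : (PySem.Dict.mk e.2).contains b = true
      · rw [cutPhase]
        rw [if_pos hc, hg, if_pos hb]
        rw [PySem.Dict.modify, hg]
        rw [PySem.Dict.insert, if_pos hc]
        apply PySem.Dict.ext
        simp only [cutToD, List.map_cons, List.map_map]
        congr 1
        · simp [cutF, PySem.Dict.erase]
        · refine List.map_congr_left (fun x hx => ?_)
          simp [Function.comp, cutF_eq_self e.1 b x (hmem x hx), hmem x hx]
      · rw [cutPhase, if_pos hc, hg, if_neg hb]
        have hfe : e.2.filter (fun kv => !(e.1 == e.1 && kv.1 == b)) = e.2 := by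
          have hnb : ∀ kv ∈ e.2, (kv.1 == b) = false := by
            intro kv hkv
            by_contra hkb
            apply hb
            simp only [PySem.Dict.contains, List.any_eq_true]
            exact ⟨kv, hkv, by simpa using hkb⟩
          refine List.filter_eq_self.mpr (fun kv hkv => ?_)
          simp [hnb kv hkv]
        simp only [cutToD, List.map_cons, cutF]
        rw [hfe]
        have : L.map (cutF e.1 b) = L := map_cutF_id e.1 b L (by
          simp only [List.mem_map]
          rintro ⟨x, hx, hfx⟩
          exact hmem x hx hfx)
        rw [this]
    · have hc : (cutToD (e :: L)).contains a = (cutToD L).contains a := by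
        simp [cutToD, PySem.Dict.contains, hea]
      have hg : (cutToD (e :: L)).getD a PySem.Dict.empty = (cutToD L).getD a PySem.Dict.empty := by
        simp [cutToD, PySem.Dict.getD, PySem.Dict.get?, hea]
      have hstep : cutPhase (cutToD (e :: L)) a b
          = PySem.Dict.mk ((e.1, PySem.Dict.mk e.2) :: (cutPhase (cutToD L) a b).items) := by
        rw [cutPhase, cutPhase, hc, hg]
        by_cases h1 : (cutToD L).contains a = true
        · rw [if_pos h1, if_pos h1]
          by_cases h2 : ((cutToD L).getD a PySem.Dict.empty).contains b = true
          · rw [if_pos h2, if_pos h2]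
            rw [PySem.Dict.modify, PySem.Dict.modify, hg]
            rw [PySem.Dict.insert, PySem.Dict.insert, hc, if_pos h1, if_pos h1]
            apply PySem.Dict.ext
            simp [cutToD, hea]
          · rw [if_neg h2, if_neg h2]
            simp [cutToD]
        · rw [if_neg h1, if_neg h1]
          simp [cutToD]
      rw [hstep, ih hnd]
      simp only [cutToD, List.map_cons]
      rw [cutF_eq_self a b e hea]

lemma cut_foldl_spec (pairs : List (Int × Int)) (L : List (Int × List (Int × Int)))
    (hnd : (L.map Prod.fst).Nodup) :
    pairs.foldl (fun d p => cutPhase (cutPhase d p.1 p.2) p.2 p.1) (cutToD L)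
    = cutToD (L.map (fun e => (e.1, e.2.filter (fun kv =>
        !(pairs.any (fun p => (e.1 == p.1 && kv.1 == p.2) || (e.1 == p.2 && kv.1 == p.1))))))) := by
  induction pairs generalizing L with
  | nil => simp
  | cons p rest ih =>
      rw [List.foldl_cons, cutPhase_spec p.1 p.2 L hnd]
      have hfst1 : (L.map (cutF p.1 p.2)).map Prod.fst = L.map Prod.fst := by
        simp [List.map_map, cutF, Function.comp]
      have h1 : ((L.map (cutF p.1 p.2)).map Prod.fst).Nodup := by rw [hfst1]; exact hnd
      rw [cutPhase_spec p.2 p.1 _ h1]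
      have hfst2 : ((L.map (cutF p.1 p.2)).map (cutF p.2 p.1)).map Prod.fst = L.map Prod.fst := by
        simp [List.map_map, cutF, Function.comp]
      rw [ih _ (by rw [hfst2]; exact hnd)]
      apply congrArg cutToD
      simp only [List.map_map]
      refine List.map_congr_left (fun e he => ?_)
      simp only [Function.comp, cutF, List.filter_filter]
      refine congrArg _ (List.filter_congr (fun kv hkv => ?_))
      simp only [List.any_cons, Bool.not_or, Bool.not_and]
      cases h1 : (e.1 == p.1) <;> cases h2 : (kv.1 == p.2) <;>
        cases h3 : (e.1 == p.2) <;> cases h4 : (kv.1 == p.1) <;> simp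

lemma cut_mem_foldl_add (pairs : List (Int × Int)) (s : PySem.Set (Int × Int)) (x : Int × Int) :
    x ∈ pairs.foldl (fun s p => PySem.Set.add (PySem.Set.add s (p.1, p.2)) (p.2, p.1)) s
      ↔ x ∈ s ∨ ∃ p ∈ pairs, x = (p.1, p.2) ∨ x = (p.2, p.1) := by
  induction pairs generalizing s with
  | nil => simp
  | cons p rest ih =>
      simp only [List.foldl_cons, ih, PySem.Set.mem_add, List.mem_cons]
      constructor
      · rintro (((h | h) | h) | ⟨q, hq, h⟩)
        · exact Or.inl h
        · exact Or.inr ⟨p, Or.inl rfl, Or.inl h⟩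
        · exact Or.inr ⟨p, Or.inl rfl, Or.inr h⟩
        · exact Or.inr ⟨q, Or.inr hq, h⟩
      · rintro (h | ⟨q, (rfl | hq), (h | h)⟩)
        · exact Or.inl (Or.inl (Or.inl h))
        · exact Or.inl (Or.inl (Or.inr h))
        · exact Or.inl (Or.inr h)
        · exact Or.inr ⟨q, hq, Or.inl h⟩
        · exact Or.inr ⟨q, hq, Or.inr h⟩

lemma cut_contains_eq (pairs : List (Int × Int)) (x y : Int) :
    PySem.Set.contains (pairs.foldl (fun s p => PySem.Set.add (PySem.Set.add s (p.1, p.2)) (p.2, p.1)) PySem.Set.empty) (x, y)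
      = pairs.any (fun p => (x == p.1 && y == p.2) || (x == p.2 && y == p.1)) := by
  rw [Bool.eq_iff_iff]
  simp only [PySem.Set.contains_iff, cut_mem_foldl_add, List.any_eq_true, Bool.or_eq_true,
    Bool.and_eq_true, beq_iff_eq, Prod.ext_iff, PySem.Set.empty, List.not_mem_nil, false_or]

-- ===== VERDICT (by name: the statement is the Claim_ definition above) =====
theorem cut_adl_spec : Claim_equal_cut_adl := by
  intro adl rc _hdom hpre
  obtain ⟨-, -, hnd⟩ := hpre
  unfold Spec_cut_adl cut_adl cut_adl_alt
  dsimp only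
  rw [cut_foldl_spec _ adl hnd]
  simp only [cutToD, List.map_map]
  refine List.map_congr_left (fun e he => ?_)
  simp only [Function.comp]
  refine congrArg (Prod.mk e.1) (List.filter_congr (fun kv hkv => ?_))
  rw [cut_contains_eq]
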